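-- pv_equiv track=rewrite | github.com/greenstripes4/CodeWars | fibonaccidigitsequence.py | find
-- ===== SOURCE A (Python) =====
-- def find(a,b,n):
--     if a == 0 and b == 0:
--         return 0
--     string = str(a)+str(b)
--     while len(string) <= n:
--         total = int(string[-1]) + int(string[-2])
--         string = string + str(total)
--     return int(string[n])
-- ===== SOURCE B (Python) =====
-- def find(a, b, n):
--     if a == 0 and b == 0:
--         return 0
--     seed = str(a) + str(b)
--     if n < len(seed):
--         return int(seed[n])
--     # purely arithmetic generation: keep only the last two digits and a length
--     # counter instead of growing a string (each appended chunk is str(x+y),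
--     # i.e. one digit if x+y<10, else '1' followed by x+y-10)
--     x, y = int(seed[-2]), int(seed[-1])
--     i = len(seed)
--     while True:
--         t = x + y
--         if t < 10:
--             if n == i:
--                 return t
--             i += 1
--             x, y = y, t
--         else:
--             if n == i:
--                 return 1
--             if n == i + 1:
--                 return t - 10
--             i += 2
--             x, y = 1, t - 10
-- ===== Notes on version B (the rewrite author's own statement) =====
-- stated objective: faster
-- what changed: B never builds the growing digit string: past the seed str(a)+str(b) it keeps only the last two digits and a position counter in a purely arithmetic loop (the appended chunk of t=x+y is the digit t if t<10, else '1' followed by t-10), so the per-step string concatenation, negative-index slicing and int() parsing disappear.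
import Mathlib
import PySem

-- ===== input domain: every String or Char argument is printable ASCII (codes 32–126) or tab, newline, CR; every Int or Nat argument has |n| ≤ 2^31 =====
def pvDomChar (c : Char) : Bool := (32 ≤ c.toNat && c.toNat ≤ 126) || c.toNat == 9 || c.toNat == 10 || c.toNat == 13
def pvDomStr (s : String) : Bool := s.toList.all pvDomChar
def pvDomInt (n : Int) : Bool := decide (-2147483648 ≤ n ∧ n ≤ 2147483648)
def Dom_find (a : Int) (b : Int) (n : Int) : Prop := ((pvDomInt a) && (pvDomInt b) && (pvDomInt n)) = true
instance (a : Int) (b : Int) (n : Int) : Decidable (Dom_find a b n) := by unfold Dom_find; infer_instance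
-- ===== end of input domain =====

-- B replaces A's ever-growing string (quadratic-ish concatenation and per-step parsing)
-- by a purely arithmetic loop keeping only the last two digits and a position counter.

-- helper lemma cited by findA_loop's termination proof
theorem toDigitsCore_append (b fuel : ℕ) : ∀ (n : ℕ) (ds : List Char),
    Nat.toDigitsCore b fuel n ds = Nat.toDigitsCore b fuel n [] ++ ds := by
  induction fuel with
  | zero => intro n ds; simp [Nat.toDigitsCore]
  | succ f ih =>
    intro n ds
    simp only [Nat.toDigitsCore]
    by_cases h : n / b = 0
    · simp [h]
    · simp only [h, if_false]
      rw [ih (n / b) ((n % b).digitChar :: ds), ih (n / b) [(n % b).digitChar]]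
      simp

theorem toChars_ne_nil (m : Int) : PySem.Int.toChars m ≠ [] := by
  unfold PySem.Int.toChars
  by_cases h : m < 0
  · simp [h]
  · simp only [h, if_false]
    unfold Nat.toDigits
    simp only [Nat.toDigitsCore]
    by_cases h2 : m.toNat / 10 = 0
    · simp [h2]
    · simp only [h2, if_false]
      rw [toDigitsCore_append]
      simp

-- ===== PORT A =====
-- int(c) for a single character c (0 on ValueError; never hit inside Pre_)
def pyDigit (c : Char) : Int := (PySem.Int.ofStr? (String.ofList [c])).getD 0

-- A's while loop. The string is kept REVERSED (rs) together with its length, so that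
-- `string = string + str(total)` is a prepend and `string[-1]`/`string[-2]` are the first
-- two characters (indices 0/1 are nonnegative literals, so plain list access with the
-- same '0'-default as an out-of-range read is exact; the defaults are reachable only
-- where Python raises, i.e. outside Pre_). This is a representation change only: the
-- proof shows it equals the forward-string loop `growA` below, step for step.
def findA_loop (n : Int) (rs : List Char) (len : Int) : List Char :=
  if h : len ≤ n then
    -- total = int(string[-1]) + int(string[-2]); string = string + str(total)
    findA_loop n
      ((PySem.Int.toChars (pyDigit (rs.getD 0 '0') + pyDigit (rs.getD 1 '0'))).reverse ++ rs)
      (len + ((PySem.Int.toChars (pyDigit (rs.getD 0 '0') + pyDigit (rs.getD 1 '0'))).length : ℕ))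
  else rs
termination_by (n + 1 - len).toNat
decreasing_by
  have hne := toChars_ne_nil (pyDigit (rs.getD 0 '0') + pyDigit (rs.getD 1 '0'))
  have := List.length_pos_iff.mpr hne
  omega

def find (a : Int) (b : Int) (n : Int) : Int :=
  if a = 0 ∧ b = 0 then 0
  else
    match PySem.List.pyGet? (findA_loop n (PySem.Int.toChars a ++ PySem.Int.toChars b).reverse
        (((PySem.Int.toChars a ++ PySem.Int.toChars b).reverse.length : ℕ) : Int)).reverse n with
    | some c => pyDigit c
    | none => 0

-- ===== PORT B =====
def findB_loop (n : Int) (x : Int) (y : Int) (i : Int) : Int :=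
  -- t = x + y appended at position i (one digit if t < 10, else '1' and t - 10)
  if x + y < 10 then
    if n = i then x + y
    else if h : i < n then findB_loop n y (x + y) (i + 1) else 0
  else
    if n = i then 1
    else if n = i + 1 then x + y - 10
    else if h : i < n then findB_loop n 1 (x + y - 10) (i + 2) else 0
termination_by (n - i).toNat
decreasing_by all_goals omega

def find_alt (a : Int) (b : Int) (n : Int) : Int :=
  if a = 0 ∧ b = 0 then 0
  else
    if n < (((PySem.Int.toChars a ++ PySem.Int.toChars b).length : ℕ) : Int) then
      match PySem.List.pyGet? (PySem.Int.toChars a ++ PySem.Int.toChars b) n with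
      | some c => pyDigit c
      | none => 0
    else
      findB_loop n (pyDigit (PySem.List.pyGetD (PySem.Int.toChars a ++ PySem.Int.toChars b) (-2) '0'))
        (pyDigit (PySem.List.pyGetD (PySem.Int.toChars a ++ PySem.Int.toChars b) (-1) '0'))
        (((PySem.Int.toChars a ++ PySem.Int.toChars b).length : ℕ) : Int)

-- ===== PRECONDITION & SPEC =====
-- Pre_ excludes exactly the inputs on which A raises: n below -len(str(a)+str(b))
-- (IndexError), n pointing at a '-' sign of a negative a or b (ValueError), and
-- single-digit negative b with n large enough to enter the loop (int('-') ValueError).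
def Pre_find (a : Int) (b : Int) (n : Int) : Prop :=
  (a = 0 ∧ b = 0) ∨
  (-(((PySem.Int.toChars a).length + (PySem.Int.toChars b).length : ℕ) : Int) ≤ n ∧
   ¬(a < 0 ∧ (n = 0 ∨ n = -(((PySem.Int.toChars a).length + (PySem.Int.toChars b).length : ℕ) : Int))) ∧
   ¬(b < 0 ∧ (n = ((PySem.Int.toChars a).length : Int) ∨ n = -((PySem.Int.toChars b).length : Int))) ∧
   ¬(-9 ≤ b ∧ b ≤ -1 ∧ (((PySem.Int.toChars a).length + (PySem.Int.toChars b).length : ℕ) : Int) ≤ n))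
instance (a : Int) (b : Int) (n : Int) : Decidable (Pre_find a b n) := by unfold Pre_find; infer_instance

def pvWitness_find : Int × Int × Int := (3, 5, 10)

def Spec_find (a : Int) (b : Int) (n : Int) (out : Int) : Prop := out = find_alt a b n
instance (a : Int) (b : Int) (n : Int) (out : Int) : Decidable (Spec_find a b n out) := by unfold Spec_find; infer_instance

-- ===== CLAIM (what is proved, stated in full; the proofs are below) =====
def Claim_equal_find : Prop := ∀ (a : Int) (b : Int) (n : Int), Dom_find a b n → Pre_find a b n → Spec_find a b n (find a b n)

-- ===== LEMMAS AND PROOFS =====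

-- the forward-string form of A's loop, used only by the proofs
def growA (n : Int) (s : List Char) : List Char :=
  if h : (s.length : Int) ≤ n then
    growA n (s ++ PySem.Int.toChars (pyDigit (PySem.List.pyGetD s (-1) '0') + pyDigit (PySem.List.pyGetD s (-2) '0')))
  else s
termination_by (n + 1 - s.length).toNat
decreasing_by
  have hne := toChars_ne_nil (pyDigit (PySem.List.pyGetD s (-1) '0') + pyDigit (PySem.List.pyGetD s (-2) '0'))
  have := List.length_pos_iff.mpr hne
  simp only [List.length_append]
  omega

theorem getD_rev_one (rs : List Char) : PySem.List.pyGetD rs.reverse (-1) '0' = rs.getD 0 '0' := by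
  cases rs with
  | nil => decide
  | cons c t =>
    rw [PySem.List.pyGetD_neg_ofNat _ 1 '0' (by omega) (by simp)]
    simp [List.getElem_reverse]

theorem getD_rev_two (rs : List Char) : PySem.List.pyGetD rs.reverse (-2) '0' = rs.getD 1 '0' := by
  match rs with
  | [] => decide
  | [c] =>
    rw [show ([c] : List Char).reverse = [c] from rfl]
    rw [show (PySem.List.pyGetD [c] (-2) '0') = '0' from rfl]
    rfl
  | c1 :: c2 :: t =>
    rw [PySem.List.pyGetD_neg_ofNat _ 2 '0' (by omega) (by simp)]
    simp

set_option maxHeartbeats 1000000 in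
theorem loopA_rev (n : Int) : ∀ (k : ℕ) (rs : List Char), (n + 1 - (rs.length : Int)).toNat ≤ k →
    findA_loop n rs ((rs.length : ℕ) : Int) = (growA n rs.reverse).reverse := by
  intro k
  induction k using Nat.strong_induction_on with
  | _ k ih =>
  intro rs hk
  rw [findA_loop, growA]
  by_cases hc : ((rs.length : ℕ) : Int) ≤ n
  · rw [dif_pos hc, dif_pos (by simpa using hc)]
    rw [getD_rev_one, getD_rev_two]
    have hne := toChars_ne_nil (pyDigit (rs.getD 0 '0') + pyDigit (rs.getD 1 '0'))
    have hpos := List.length_pos_iff.mpr hne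
    set ch := PySem.Int.toChars (pyDigit (rs.getD 0 '0') + pyDigit (rs.getD 1 '0')) with hch
    have harg : ((rs.length : ℕ) : Int) + (ch.length : ℕ) = (((ch.reverse ++ rs).length : ℕ) : Int) := by
      simp; ring
    rw [harg]
    rw [ih (k - 1) (by omega) (ch.reverse ++ rs) (by simp; omega)]
    congr 1
    simp
  · rw [dif_neg hc, dif_neg (by simpa using hc)]
    simp

-- str(n) for n : ℕ, as structural recursion on the decimal digits
def natDigs (m : ℕ) : List Char :=
  if h : m < 10 then [Nat.digitChar m]
  else natDigs (m / 10) ++ [Nat.digitChar (m % 10)]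
termination_by m
decreasing_by omega

theorem toDigitsCore_eq_natDigs : ∀ (fuel m : ℕ), m < fuel →
    Nat.toDigitsCore 10 fuel m [] = natDigs m := by
  intro fuel
  induction fuel with
  | zero => intro m hm; omega
  | succ f ih =>
    intro m hm
    rw [natDigs]
    simp only [Nat.toDigitsCore]
    by_cases h : m / 10 = 0
    · have hlt : m < 10 := by omega
      simp only [h, if_true, dif_pos hlt]
      have : m % 10 = m := Nat.mod_eq_of_lt hlt
      rw [this]
    · have hge : ¬ m < 10 := by omega
      simp only [h, if_false, dif_neg hge]
      rw [toDigitsCore_append, ih (m / 10) (by omega)]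

theorem toChars_eq (m : Int) : PySem.Int.toChars m =
    (if m < 0 then ['-'] else []) ++ natDigs m.natAbs := by
  unfold PySem.Int.toChars
  by_cases h : m < 0
  · simp only [h, if_true]
    unfold Nat.toDigits
    rw [toDigitsCore_eq_natDigs (m.natAbs + 1) m.natAbs (by omega)]
    simp
  · simp only [h, if_false]
    unfold Nat.toDigits
    rw [toDigitsCore_eq_natDigs (m.toNat + 1) m.toNat (by omega)]
    have : m.toNat = m.natAbs := by omega
    simp [this]

theorem natDigs_ends (m : ℕ) : ∃ p, natDigs m = p ++ [Nat.digitChar (m % 10)] := by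
  rw [natDigs]
  by_cases h : m < 10
  · exact ⟨[], by simp [dif_pos h, Nat.mod_eq_of_lt h]⟩
  · exact ⟨natDigs (m / 10), by simp [dif_neg h]⟩

theorem pyDigit_digitChar (k : ℕ) (hk : k < 10) : pyDigit (Nat.digitChar k) = (k : Int) := by
  interval_cases k <;> decide

-- the nth character of the final string, as A reads it off
def retA (s : List Char) (n : Int) : Int :=
  match PySem.List.pyGet? s n with
  | some c => pyDigit c
  | none => 0

theorem loop_eq (n : Int) : ∀ (k : ℕ) (p : List Char) (x y : ℕ), x < 10 → y < 10 →
    (n - (p.length + 2 : ℕ)).toNat ≤ k → ((p.length + 2 : ℕ) : Int) ≤ n →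
    retA (growA n (p ++ [Nat.digitChar x, Nat.digitChar y])) n
      = findB_loop n (x : Int) (y : Int) ((p.length + 2 : ℕ) : Int) := by
  intro k
  induction k using Nat.strong_induction_on with
  | _ k ih =>
  intro p x y hx hy hk hn
  set s := p ++ [Nat.digitChar x, Nat.digitChar y] with hs
  have slen : s.length = p.length + 2 := by simp [hs]
  have h1 : PySem.List.pyGetD s (-1) '0' = Nat.digitChar y := by
    have : s = (p ++ [Nat.digitChar x]) ++ [Nat.digitChar y] := by simp [hs]
    rw [this, PySem.List.pyGetD_neg_one_append_singleton]
  have h2 : PySem.List.pyGetD s (-2) '0' = Nat.digitChar x := by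
    rw [PySem.List.pyGetD_neg_ofNat s 2 '0' (by omega) (by omega)]
    simp [hs]
  have htot : pyDigit (PySem.List.pyGetD s (-1) '0') + pyDigit (PySem.List.pyGetD s (-2) '0')
      = ((x + y : ℕ) : Int) := by
    rw [h1, h2, pyDigit_digitChar x hx, pyDigit_digitChar y hy]; push_cast; ring
  have hchars : PySem.Int.toChars ((x + y : ℕ) : Int) = natDigs (x + y) := by
    rw [toChars_eq, if_neg (by omega), Int.natAbs_natCast]
    simp
  rw [growA, dif_pos (by rw [slen]; exact_mod_cast hn), htot, hchars]
  rw [findB_loop]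
  by_cases hxy : x + y < 10
  · have hnd : natDigs (x + y) = [Nat.digitChar (x + y)] := by rw [natDigs, dif_pos hxy]
    have ht10 : ((x : Int) + y < 10) := by omega
    rw [hnd, if_pos ht10]
    by_cases heq : n = ((p.length + 2 : ℕ) : Int)
    · rw [if_pos heq]
      rw [growA, dif_neg (by simp [hs]; omega)]
      unfold retA
      have : PySem.List.pyGet? (s ++ [Nat.digitChar (x + y)]) n = some (Nat.digitChar (x + y)) := by
        rw [heq, ← slen]
        exact PySem.List.pyGet?_append_length s [] (Nat.digitChar (x + y))
      rw [this]
      show pyDigit (Nat.digitChar (x + y)) = _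
      rw [pyDigit_digitChar _ hxy]
      push_cast; ring
    · rw [if_neg heq]
      have hlt : ((p.length + 2 : ℕ) : Int) < n := lt_of_le_of_ne hn (Ne.symm heq)
      rw [dif_pos hlt]
      have hs2 : s ++ [Nat.digitChar (x + y)] = (p ++ [Nat.digitChar x]) ++ [Nat.digitChar y, Nat.digitChar (x + y)] := by
        simp [hs]
      have hk' : (n - (((p ++ [Nat.digitChar x]).length + 2 : ℕ) : Int)).toNat ≤ k - 1 := by
        simp only [List.length_append, List.length_cons, List.length_nil]
        omega
      rw [hs2]
      rw [ih (k - 1) (by omega) (p ++ [Nat.digitChar x]) y (x + y) hy hxy hk'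
        (by simp only [List.length_append, List.length_cons, List.length_nil]; push_cast; push_cast at hlt; omega)]
      congr 1
      simp only [List.length_append, List.length_cons, List.length_nil]
      push_cast; ring
  · have hge : 10 ≤ x + y := by omega
    have hle : x + y < 20 := by omega
    have hdiv : (x + y) / 10 = 1 := by omega
    have hmod : (x + y) % 10 = x + y - 10 := by omega
    have hnd : natDigs (x + y) = [Nat.digitChar 1, Nat.digitChar (x + y - 10)] := by
      rw [natDigs, dif_neg (by omega), hdiv, hmod, natDigs]
      simp
    have ht10 : ¬ ((x : Int) + y < 10) := by omega
    rw [hnd, if_neg ht10]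
    by_cases heq : n = ((p.length + 2 : ℕ) : Int)
    · rw [if_pos heq]
      rw [growA, dif_neg (by simp [hs]; omega)]
      unfold retA
      have hsp : s ++ [Nat.digitChar 1, Nat.digitChar (x + y - 10)]
          = s ++ Nat.digitChar 1 :: [Nat.digitChar (x + y - 10)] := by simp
      have : PySem.List.pyGet? (s ++ [Nat.digitChar 1, Nat.digitChar (x + y - 10)]) n
          = some (Nat.digitChar 1) := by
        rw [hsp, heq, ← slen]
        exact PySem.List.pyGet?_append_length s [Nat.digitChar (x + y - 10)] (Nat.digitChar 1)
      rw [this]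
      show pyDigit (Nat.digitChar 1) = 1
      decide
    · rw [if_neg heq]
      by_cases heq2 : n = ((p.length + 2 : ℕ) : Int) + 1
      · rw [if_pos heq2]
        rw [growA, dif_neg (by simp [hs]; omega)]
        unfold retA
        have hsp : s ++ [Nat.digitChar 1, Nat.digitChar (x + y - 10)]
            = (s ++ [Nat.digitChar 1]) ++ [Nat.digitChar (x + y - 10)] := by simp
        have : PySem.List.pyGet? (s ++ [Nat.digitChar 1, Nat.digitChar (x + y - 10)]) n
            = some (Nat.digitChar (x + y - 10)) := by
          rw [hsp]
          have : n = (((s ++ [Nat.digitChar 1]).length : ℕ) : Int) := by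
            simp [slen] at heq2 ⊢
            push_cast
            omega
          rw [this]
          exact PySem.List.pyGet?_append_length (s ++ [Nat.digitChar 1]) [] (Nat.digitChar (x + y - 10))
        rw [this]
        show pyDigit (Nat.digitChar (x + y - 10)) = _
        rw [pyDigit_digitChar _ (by omega)]
        push_cast
        omega
      · rw [if_neg heq2]
        have hlt : ((p.length + 2 : ℕ) : Int) + 2 ≤ n := by
          rcases lt_or_eq_of_le hn with h | h
          · rcases lt_or_eq_of_le (Int.add_one_le_iff.mpr h) with h' | h'
            · omega
            · exact absurd h'.symm heq2
          · exact absurd h.symm heq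
        rw [dif_pos (by omega)]
        have hs2 : s ++ [Nat.digitChar 1, Nat.digitChar (x + y - 10)]
            = (p ++ [Nat.digitChar x, Nat.digitChar y]) ++ [Nat.digitChar 1, Nat.digitChar (x + y - 10)] := by
          rw [hs]
        have hk' : (n - (((p ++ [Nat.digitChar x, Nat.digitChar y]).length + 2 : ℕ) : Int)).toNat ≤ k - 1 := by
          simp only [List.length_append, List.length_cons, List.length_nil]
          omega
        rw [hs2]
        rw [ih (k - 1) (by omega) (p ++ [Nat.digitChar x, Nat.digitChar y]) 1 (x + y - 10) (by omega) (by omega) hk'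
          (by simp only [List.length_append, List.length_cons, List.length_nil]; push_cast; push_cast at hlt; omega)]
        congr 1 <;> (try simp only [List.length_append, List.length_cons, List.length_nil]) <;> push_cast <;> omega

theorem seed_decomp (a b : Int) (hb : ¬(-9 ≤ b ∧ b ≤ -1)) :
    ∃ (p : List Char) (x y : ℕ), x < 10 ∧ y < 10 ∧
      PySem.Int.toChars a ++ PySem.Int.toChars b = p ++ [Nat.digitChar x, Nat.digitChar y] := by
  by_cases hsmall : b.natAbs < 10
  · -- then 0 ≤ b ≤ 9 (negatives -9..-1 are excluded): str(b) is one digit,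
    -- the previous char is the last digit of str(a)
    have hb0 : 0 ≤ b := by omega
    obtain ⟨p, hp⟩ := natDigs_ends a.natAbs
    refine ⟨(if a < 0 then ['-'] else []) ++ p, a.natAbs % 10, b.natAbs, by omega, hsmall, ?_⟩
    rw [toChars_eq a, toChars_eq b, hp, natDigs]
    simp [dif_pos hsmall, not_lt.mpr hb0]
  · -- |b| ≥ 10: the last two digits of str(b)
    obtain ⟨q, hq⟩ := natDigs_ends (b.natAbs / 10)
    refine ⟨PySem.Int.toChars a ++ (if b < 0 then ['-'] else []) ++ q,
      b.natAbs / 10 % 10, b.natAbs % 10, by omega, by omega, ?_⟩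
    rw [toChars_eq b, natDigs, dif_neg hsmall, hq]
    simp

-- ===== VERDICT (by name: the statement is the Claim_ definition above) =====
theorem find_spec : Claim_equal_find := by
  unfold Claim_equal_find
  intro a b n hdom hpre
  unfold Spec_find find find_alt
  by_cases h0 : a = 0 ∧ b = 0
  · rw [if_pos h0, if_pos h0]
  · rw [if_neg h0, if_neg h0]
    rw [loopA_rev n ((n + 1 - ((PySem.Int.toChars a ++ PySem.Int.toChars b).reverse.length : Int)).toNat)
      (PySem.Int.toChars a ++ PySem.Int.toChars b).reverse (le_refl _), List.reverse_reverse,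
      List.reverse_reverse]
    by_cases hn : n < ((PySem.Int.toChars a ++ PySem.Int.toChars b).length : Int)
    · rw [if_pos hn]
      show retA (growA n (PySem.Int.toChars a ++ PySem.Int.toChars b)) n
          = retA (PySem.Int.toChars a ++ PySem.Int.toChars b) n
      rw [growA, dif_neg (by omega)]
    · rw [if_neg hn]
      push Not at hn
      have hb9 : ¬(-9 ≤ b ∧ b ≤ -1) := by
        rcases hpre with h | ⟨_, _, _, h4⟩
        · exact absurd h h0
        · intro hb
          refine h4 ⟨hb.1, hb.2, ?_⟩
          simpa using hn
      obtain ⟨p, x, y, hx, hy, hseed⟩ := seed_decomp a b hb9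
      rw [hseed]
      rw [hseed] at hn
      have slen2 : (p ++ [Nat.digitChar x, Nat.digitChar y]).length = p.length + 2 := by simp
      rw [slen2] at hn
      have h1 : PySem.List.pyGetD (p ++ [Nat.digitChar x, Nat.digitChar y]) (-1) '0' = Nat.digitChar y := by
        have hsh : p ++ [Nat.digitChar x, Nat.digitChar y] = (p ++ [Nat.digitChar x]) ++ [Nat.digitChar y] := by simp
        rw [hsh, PySem.List.pyGetD_neg_one_append_singleton]
      have h2 : PySem.List.pyGetD (p ++ [Nat.digitChar x, Nat.digitChar y]) (-2) '0' = Nat.digitChar x := by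
        rw [PySem.List.pyGetD_neg_ofNat _ 2 '0' (by omega) (by simp)]
        simp
      rw [h1, h2, pyDigit_digitChar x hx, pyDigit_digitChar y hy, slen2]
      show retA (growA n (p ++ [Nat.digitChar x, Nat.digitChar y])) n
          = findB_loop n (x : Int) (y : Int) ((p.length + 2 : ℕ) : Int)
      exact loop_eq n ((n - ((p.length + 2 : ℕ) : Int)).toNat) p x y hx hy (le_refl _) hn
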